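-- pv_equiv track=rewrite | github.com/u5581638/Tripartite-CRISPR-diversity | Chapter_4/1_array_validation/1_array_validation/pilercr_pos_extractor_annotation_full_spacers.py | true_repeat
-- ===== SOURCE A (Python) =====
-- def true_repeat(dr_seq, dr_dot, deletions=True):
-- 	# direct repeats and dots should be the same length. Need to go through the dots and substitute characters if non-dot character is found
-- 	i = 0
-- 	output_seq = list(dr_seq)
-- 	dr_dot = list(dr_dot)
-- 	while (i < len(dr_dot)):
--
-- 		if (dr_dot[i] != "."):
-- 			if(dr_dot[i] == '-'): # deletion
-- 				if (deletions):
-- 					output_seq.pop(i)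
-- 					dr_dot.pop(i)
--
-- 			else:
-- 				output_seq[i] = dr_dot[i]
-- 		i += 1
-- 	return "".join(output_seq)
-- ===== SOURCE B (Python) =====
-- def true_repeat(dr_seq, dr_dot, deletions=True):
-- 	# Single linear pass over (seq, dot) pairs with a skip flag replacing A's list.pop calls.
-- 	out = []
-- 	skip = False
-- 	for s, c in zip(dr_seq, dr_dot):
-- 		if skip:
-- 			out.append(s)
-- 			skip = False
-- 		elif c == '.':
-- 			out.append(s)
-- 		elif c == '-':
-- 			if deletions:
-- 				skip = True
-- 			else:
-- 				out.append(s)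
-- 		else:
-- 			out.append(c)
-- 	return "".join(out) + dr_seq[len(dr_dot):]
-- ===== Notes on version B (the rewrite author's own statement) =====
-- stated objective: faster
-- what changed: Replaces A's while-loop that mutates two lists with O(n) pop(i)/index operations by one linear pass over zip(dr_seq, dr_dot) with a skip flag reproducing the pop-then-skip semantics, plus the untouched tail.
-- outside the precondition, e.g. on true_repeat('A', '..', True): A returns 'A', B returns 'A'; on true_repeat('A', 'XX', True): A raises IndexError, B returns 'X'
import Mathlib
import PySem

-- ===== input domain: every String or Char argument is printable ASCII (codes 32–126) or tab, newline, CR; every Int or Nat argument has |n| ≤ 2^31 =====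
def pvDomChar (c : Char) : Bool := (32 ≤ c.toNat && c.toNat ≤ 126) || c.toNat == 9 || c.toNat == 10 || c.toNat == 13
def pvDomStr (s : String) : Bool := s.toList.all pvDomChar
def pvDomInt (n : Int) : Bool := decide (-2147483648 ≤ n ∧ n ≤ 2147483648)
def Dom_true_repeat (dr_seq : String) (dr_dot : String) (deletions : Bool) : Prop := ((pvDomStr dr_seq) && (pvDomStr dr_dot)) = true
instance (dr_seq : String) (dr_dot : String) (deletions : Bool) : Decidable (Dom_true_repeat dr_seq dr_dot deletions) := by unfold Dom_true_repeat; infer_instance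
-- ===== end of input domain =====

-- B replaces A's quadratic index/pop mutation loop by one linear pass over (seq, dot)
-- pairs with a skip flag; equivalence proved for dr_dot no longer than dr_seq.

-- ===== PORT A =====
-- A's while loop over the two mutable lists: state = (output_seq, dr_dot, i).
-- output_seq.pop(i) / dr_dot.pop(i) are exact as List.eraseIdx since i < length at every
-- pop reached inside Pre_; output_seq[i] = c is List.set (exact when i < length, which
-- holds inside Pre_; out of range Python raises — excluded by Pre_).
def trLoopA (deletions : Bool) (out : List Char) (ddot : List Char) (i : Nat) : List Char :=
  if h : i < ddot.length then
    if ddot[i] ≠ '.' then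
      if ddot[i] = '-' then
        if deletions then
          trLoopA deletions (out.eraseIdx i) (ddot.eraseIdx i) (i + 1)
        else
          trLoopA deletions out ddot (i + 1)
      else
        trLoopA deletions (out.set i ddot[i]) ddot (i + 1)
    else
      trLoopA deletions out ddot (i + 1)
  else
    out
termination_by ddot.length - i
decreasing_by
  · have : (ddot.eraseIdx i).length = ddot.length - 1 := by
      simp [List.length_eraseIdx, h]
    omega
  · omega
  · omega
  · omega

def true_repeat (dr_seq : String) (dr_dot : String) (deletions : Bool) : String :=
  String.ofList (trLoopA deletions dr_seq.toList dr_dot.toList 0)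

-- ===== PORT B =====
-- Source B's for-loop over zip(dr_seq, dr_dot) building `out`, with the skip flag.
def trLoopB (deletions : Bool) : List Char → List Char → Bool → List Char
  | _, [], _ => []
  | [], _, _ => []
  | s :: ss, c :: cs, skip =>
    if skip then s :: trLoopB deletions ss cs false
    else if c = '.' then s :: trLoopB deletions ss cs false
    else if c = '-' then
      if deletions then trLoopB deletions ss cs true
      else s :: trLoopB deletions ss cs false
    else c :: trLoopB deletions ss cs false

-- dr_seq[len(dr_dot):] — a slice with non-negative start: PySem.List.slice_from_natCast.
def true_repeat_alt (dr_seq : String) (dr_dot : String) (deletions : Bool) : String :=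
  String.ofList (trLoopB deletions dr_seq.toList dr_dot.toList false
             ++ PySem.List.slice dr_seq.toList (some (dr_dot.toList.length : Int)) none)

-- ===== PRECONDITION & SPEC =====
-- Pre_ excludes inputs where dr_dot is longer than dr_seq: there A's substitution/pop
-- indexing past the end of output_seq raises IndexError (except when the overhang is
-- never touched, an accident of the misalignment the function's comment rules out).
def Pre_true_repeat (dr_seq : String) (dr_dot : String) (deletions : Bool) : Prop :=
  dr_dot.toList.length ≤ dr_seq.toList.length
instance (dr_seq : String) (dr_dot : String) (deletions : Bool) : Decidable (Pre_true_repeat dr_seq dr_dot deletions) := by unfold Pre_true_repeat; infer_instance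

def pvWitness_true_repeat : String × String × Bool := ("GTTCAC", "..A.-.", true)

def Spec_true_repeat (dr_seq : String) (dr_dot : String) (deletions : Bool) (out : String) : Prop := out = true_repeat_alt dr_seq dr_dot deletions
instance (dr_seq : String) (dr_dot : String) (deletions : Bool) (out : String) : Decidable (Spec_true_repeat dr_seq dr_dot deletions out) := by unfold Spec_true_repeat; infer_instance

-- ===== CLAIM (what is proved, stated in full; the proofs are below) =====
def Claim_equal_true_repeat : Prop := ∀ (dr_seq : String) (dr_dot : String) (deletions : Bool), Dom_true_repeat dr_seq dr_dot deletions → Pre_true_repeat dr_seq dr_dot deletions → Spec_true_repeat dr_seq dr_dot deletions (true_repeat dr_seq dr_dot deletions)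

-- ===== LEMMAS AND PROOFS =====

-- Main invariant: A's loop at index i = |pre| on out = pre ++ rs, ddot = preD ++ ds
-- (prefixes already processed, |pre| = |preD|) yields pre, then B's pass on (rs, ds),
-- then the untouched tail of rs beyond |ds|.
theorem pv_eraseIdx_mid (pre rs : List Char) (r : Char) :
    (pre ++ r :: rs).eraseIdx pre.length = pre ++ rs := by
  induction pre with
  | nil => rfl
  | cons a t ih => simp [List.eraseIdx_cons_succ, ih]

theorem pv_set_mid (pre rs : List Char) (c r : Char) :
    (pre ++ r :: rs).set pre.length c = pre ++ c :: rs := by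
  induction pre with
  | nil => rfl
  | cons a t ih => simpa [List.set_cons_succ] using ih

theorem trLoopA_eq (deletions : Bool) :
    ∀ (n : Nat) (ds rs pre preD : List Char),
      ds.length = n → preD.length = pre.length → ds.length ≤ rs.length →
      trLoopA deletions (pre ++ rs) (preD ++ ds) pre.length
        = pre ++ trLoopB deletions rs ds false ++ rs.drop ds.length := by
  intro n
  induction n using Nat.strong_induction_on with
  | _ n ih =>
    intro ds rs pre preD hn hlen hle
    match ds, rs with
    | [], rs =>
      rw [trLoopA]
      rw [dif_neg (by simp [hlen])]
      cases rs <;> simp [trLoopB]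
    | c :: ds', [] => simp at hle
    | c :: ds', r :: rs' =>
      have hi : pre.length < (preD ++ c :: ds').length := by simp [hlen]
      have hget : (preD ++ c :: ds')[pre.length]'hi = c := by
        rw [List.getElem_append_right (by omega)]
        simp [hlen]
      have hlt : ds'.length < n := by simp at hn; omega
      rw [trLoopA]
      rw [dif_pos hi]
      simp only [hget]
      by_cases hdot : c = '.'
      · -- dot: keep r
        subst hdot
        rw [if_neg (by decide)]
        have step := ih ds'.length hlt ds' rs' (pre ++ [r]) (preD ++ ['.'])
          rfl (by simp [hlen]) (by simpa using hle)
        rw [show pre ++ r :: rs' = (pre ++ [r]) ++ rs' by simp,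
            show preD ++ '.' :: ds' = (preD ++ ['.']) ++ ds' by simp,
            show pre.length + 1 = (pre ++ [r]).length by simp, step]
        simp [trLoopB]
      · by_cases hdash : c = '-'
        · subst hdash
          rw [if_pos (by decide), if_pos rfl]
          cases deletions with
          | false =>
            rw [if_neg (by simp)]
            have step := ih ds'.length hlt ds' rs' (pre ++ [r]) (preD ++ ['-'])
              rfl (by simp [hlen]) (by simpa using hle)
            rw [show pre ++ r :: rs' = (pre ++ [r]) ++ rs' by simp,
                show preD ++ '-' :: ds' = (preD ++ ['-']) ++ ds' by simp,
                show pre.length + 1 = (pre ++ [r]).length by simp, step]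
            simp [trLoopB]
          | true =>
            rw [if_pos rfl]
            have hera : (pre ++ r :: rs').eraseIdx pre.length = pre ++ rs' :=
              pv_eraseIdx_mid ..
            have heraD : (preD ++ '-' :: ds').eraseIdx pre.length = preD ++ ds' := by
              rw [← hlen]; exact pv_eraseIdx_mid ..
            rw [hera, heraD]
            match ds', rs' with
            | [], rs' =>
              -- i+1 is past the end of the shrunken ddot: loop ends, returns pre ++ rs'
              rw [trLoopA]
              rw [dif_neg (by simp [hlen])]
              simp [trLoopB]
            | d' :: ds'', [] => simp at hle
            | d' :: ds'', r' :: rs'' =>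
              have hlt2 : ds''.length < n := by simp at hn; omega
              have step := ih ds''.length hlt2 ds'' rs'' (pre ++ [r']) (preD ++ [d'])
                rfl (by simp [hlen]) (by simp at hle ⊢; omega)
              rw [show pre ++ r' :: rs'' = (pre ++ [r']) ++ rs'' by simp,
                  show preD ++ d' :: ds'' = (preD ++ [d']) ++ ds'' by simp,
                  show pre.length + 1 = (pre ++ [r']).length by simp, step]
              simp [trLoopB]
        · -- substitution: out[i] := c
          rw [if_pos hdot, if_neg hdash]
          have hset : (pre ++ r :: rs').set pre.length c = pre ++ c :: rs' :=
            pv_set_mid ..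
          rw [hset]
          have step := ih ds'.length hlt ds' rs' (pre ++ [c]) (preD ++ [c])
            rfl (by simp [hlen]) (by simpa using hle)
          rw [show pre ++ c :: rs' = (pre ++ [c]) ++ rs' by simp,
              show preD ++ c :: ds' = (preD ++ [c]) ++ ds' by simp,
              show pre.length + 1 = (pre ++ [c]).length by simp, step]
          simp [trLoopB, hdot, hdash]

-- ===== VERDICT (by name: the statement is the Claim_ definition above) =====
theorem true_repeat_spec : Claim_equal_true_repeat := by
  intro dr_seq dr_dot deletions _ hpre
  unfold Spec_true_repeat true_repeat true_repeat_alt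
  rw [PySem.List.slice_from_natCast]
  congr 1
  have step := trLoopA_eq deletions dr_dot.toList.length dr_dot.toList dr_seq.toList [] []
    rfl rfl hpre
  simpa using step
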